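-- pv_equiv track=rewrite | github.com/zachsirera/CS7641 | wine_2/svm.py | gen_fold_list
-- ===== SOURCE A (Python) =====
-- def gen_fold_list(k):
--
-- 	a = []
--
-- 	for i in range(k):
-- 		b = []
-- 		for j in range(k):
-- 			if i != j:
-- 				b.append(j)
-- 		a.append(b)
--
-- 	return a
-- ===== SOURCE B (Python) =====
-- def gen_fold_list(k):
--     full = list(range(k))
--     a = []
--     for i in range(k):
--         a.append(full[:i] + full[i + 1:])
--     return a
-- ===== Notes on version B (the rewrite author's own statement) =====
-- stated objective: alternative
-- what changed: B precomputes the full index list once and builds each row as the concatenation of the two contiguous slices around i, removing the inner filtering loop.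
import Mathlib
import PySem

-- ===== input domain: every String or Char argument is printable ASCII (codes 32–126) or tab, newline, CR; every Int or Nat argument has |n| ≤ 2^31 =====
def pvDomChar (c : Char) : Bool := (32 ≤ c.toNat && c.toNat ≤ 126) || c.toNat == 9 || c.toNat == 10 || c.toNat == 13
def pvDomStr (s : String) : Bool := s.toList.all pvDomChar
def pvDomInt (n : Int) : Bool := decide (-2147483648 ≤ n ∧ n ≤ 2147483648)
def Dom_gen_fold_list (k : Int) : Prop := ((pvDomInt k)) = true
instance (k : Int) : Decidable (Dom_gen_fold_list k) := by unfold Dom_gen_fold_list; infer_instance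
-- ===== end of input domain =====

-- B builds each row as full[:i] ++ full[i+1:] from a precomputed full index list instead of A's inner filtering loop; same O(k^2) cost.

-- ===== PORT A =====
def gen_fold_list (k : Int) : List (List Int) :=
  (PySem.List.pyRange 0 k 1).foldl
    (fun a i =>
      a ++ [(PySem.List.pyRange 0 k 1).foldl (fun b j => if i ≠ j then b ++ [j] else b) []]) []

-- ===== PORT B =====
def gen_fold_list_alt (k : Int) : List (List Int) :=
  let full := PySem.List.pyRange 0 k 1
  (PySem.List.pyRange 0 k 1).foldl
    (fun a i =>
      a ++ [PySem.List.slice full none (some i) ++ PySem.List.slice full (some (i + 1)) none]) []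

-- ===== PRECONDITION & SPEC =====
def Spec_gen_fold_list (k : Int) (out : List (List Int)) : Prop := out = gen_fold_list_alt k
instance (k : Int) (out : List (List Int)) : Decidable (Spec_gen_fold_list k out) := by unfold Spec_gen_fold_list; infer_instance

-- ===== CLAIM (what is proved, stated in full; the proofs are below) =====
def Claim_equal_gen_fold_list : Prop := ∀ (k : Int), Dom_gen_fold_list k → Spec_gen_fold_list k (gen_fold_list k)

-- ===== LEMMAS AND PROOFS =====

-- For 0 ≤ i < k, A's inner filter loop over range(k) equals the two slices of B around i.
theorem pv_row_eq (k i : Int) (h0 : 0 ≤ i) (hk : i < k) :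
    (PySem.List.pyRange 0 k 1).filter (fun j => decide (i ≠ j)) =
      PySem.List.slice (PySem.List.pyRange 0 k 1) none (some i) ++
      PySem.List.slice (PySem.List.pyRange 0 k 1) (some (i + 1)) none := by
  have hsplit : PySem.List.pyRange 0 k 1 =
      PySem.List.pyRange 0 i 1 ++ (i :: PySem.List.pyRange (i + 1) k 1) := by
    rw [PySem.List.pyRange_one_append 0 i k h0 (le_of_lt hk),
        PySem.List.pyRange_one_cons hk]
  rw [hsplit, PySem.List.slice_to _ h0, PySem.List.slice_from _ (by omega)]
  have hlen1 : (PySem.List.pyRange 0 i 1).length = i.toNat := by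
    simp [PySem.List.length_pyRange_one]
  rw [List.filter_append]
  have h1 : (PySem.List.pyRange 0 i 1).filter (fun j => decide (i ≠ j)) =
      PySem.List.pyRange 0 i 1 := by
    apply List.filter_eq_self.mpr
    intro a ha
    have := (PySem.List.mem_pyRange_one).mp ha
    simp; omega
  have h2 : ((i :: PySem.List.pyRange (i + 1) k 1).filter (fun j => decide (i ≠ j))) =
      PySem.List.pyRange (i + 1) k 1 := by
    simp only [List.filter_cons]
    rw [if_neg (by simp)]
    apply List.filter_eq_self.mpr
    intro a ha
    have := (PySem.List.mem_pyRange_one).mp ha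
    simp; omega
  rw [h1, h2]
  congr 1
  · rw [List.take_append_of_le_length (by omega), List.take_of_length_le (by omega)]
  · have h3 : (i + 1).toNat = (PySem.List.pyRange 0 i 1).length + 1 := by omega
    rw [h3, List.drop_append]
    simp

-- ===== VERDICT (by name: the statement is the Claim_ definition above) =====
theorem gen_fold_list_spec : Claim_equal_gen_fold_list := by
  intro k _
  unfold Spec_gen_fold_list gen_fold_list gen_fold_list_alt
  rw [PySem.List.foldl_append_singleton_eq_map, PySem.List.foldl_append_singleton_eq_map]
  apply List.map_congr_left
  intro i hi
  have h := (PySem.List.mem_pyRange_one).mp hi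
  have hfun : (fun (b : List Int) (j : Int) => if i ≠ j then b ++ [j] else b)
      = fun b j => if decide (i ≠ j) = true then b ++ [j] else b := by
    funext b j; simp
  rw [hfun, PySem.List.foldl_append_if]
  simpa using pv_row_eq k i h.1 h.2
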